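-- pv_equiv track=rewrite | github.com/petrfiedler/image-dithering | app/src/dithering/bayer.py | bitInterleave
-- ===== SOURCE A (Python) =====
-- def bitInterleave(a, b):
--     """ Interleave bits of two numbers. """
--     result = 0
--     shift = 0
--     nums = [a, b]
--     while nums[0] or nums[1]:
--         # switch between bits from a and b
--         for n in range(2):
--             bit = (nums[n] & 1) << shift
--             result |= bit
--             nums[n] >>= 1
--             shift += 1
--     return result
-- ===== SOURCE B (Python) =====
-- def bitInterleave(a, b):
--     """ Interleave bits of two numbers. """
--     def spread(x):
--         # place bit i of x at position 2*i
--         r = 0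
--         i = 0
--         while x:
--             r += (x & 1) << (2 * i)
--             x >>= 1
--             i += 1
--         return r
--     return spread(a) + (spread(b) << 1)
-- ===== Notes on version B (the rewrite author's own statement) =====
-- stated objective: alternative
-- what changed: Replaces A's single lockstep loop that alternates a-bit/b-bit into one accumulator with a helper spread(x) that expands each number's bits to even positions in its own independent pass, combining the two spreads arithmetically as spread(a) + (spread(b) << 1).
import Mathlib
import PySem

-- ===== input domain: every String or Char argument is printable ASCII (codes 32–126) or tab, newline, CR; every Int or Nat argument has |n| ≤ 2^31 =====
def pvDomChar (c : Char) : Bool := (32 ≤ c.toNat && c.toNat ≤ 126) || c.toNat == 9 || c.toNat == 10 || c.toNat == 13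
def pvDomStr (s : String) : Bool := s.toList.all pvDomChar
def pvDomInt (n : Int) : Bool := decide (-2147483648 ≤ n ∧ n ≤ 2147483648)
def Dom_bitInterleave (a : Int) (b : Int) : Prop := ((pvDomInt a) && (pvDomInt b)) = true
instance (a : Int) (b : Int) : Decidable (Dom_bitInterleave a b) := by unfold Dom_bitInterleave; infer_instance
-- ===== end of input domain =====

-- B interleaves by two independent bit-spreading passes (spread(a) + (spread(b) << 1)) instead of
-- A's single lockstep loop; equivalence is claimed on nonnegative inputs (A loops forever otherwise).

-- ===== PORT A =====
-- the while-loop of A, with fuel making the recursion total; 64 iterations are more than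
-- enough for the nonnegative inputs admitted by Pre_ (|a|,|b| ≤ 2^31 on Dom)
def bitInterleaveLoop : Nat → Int → Int → Int → Nat → Int
  | 0, _, _, result, _ => result
  | fuel + 1, a, b, result, shift =>
    if a ≠ 0 ∨ b ≠ 0 then
      -- n = 0: bit from a; then n = 1: bit from b
      bitInterleaveLoop fuel (a >>> (1 : Nat)) (b >>> (1 : Nat))
        (Int.lor (Int.lor result ((Int.land a 1) <<< shift)) ((Int.land b 1) <<< (shift + 1)))
        (shift + 2)
    else result

def bitInterleave (a : Int) (b : Int) : Int :=
  bitInterleaveLoop 64 a b 0 0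

-- ===== PORT B =====
-- the while-loop of spread(x) in Source B, same fuel convention
def spreadLoop : Nat → Int → Nat → Int → Int
  | 0, _, _, r => r
  | fuel + 1, x, i, r =>
    if x ≠ 0 then
      spreadLoop fuel (x >>> (1 : Nat)) (i + 1) (r + ((Int.land x 1) <<< (2 * i)))
    else r

def bitInterleave_alt (a : Int) (b : Int) : Int :=
  spreadLoop 64 a 0 0 + (spreadLoop 64 b 0 0 <<< (1 : Nat))

-- ===== PRECONDITION & SPEC =====
-- A's while-loop never terminates when a or b is negative (>> preserves the sign bit), so A
-- returns exactly on nonnegative pairs; Pre_ excludes only those non-returning inputs.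
def Pre_bitInterleave (a : Int) (b : Int) : Prop := 0 ≤ a ∧ 0 ≤ b
instance (a : Int) (b : Int) : Decidable (Pre_bitInterleave a b) := by unfold Pre_bitInterleave; infer_instance
def pvWitness_bitInterleave : Int × Int := (5, 3)

def Spec_bitInterleave (a : Int) (b : Int) (out : Int) : Prop := out = bitInterleave_alt a b
instance (a : Int) (b : Int) (out : Int) : Decidable (Spec_bitInterleave a b out) := by unfold Spec_bitInterleave; infer_instance

-- ===== CLAIM (what is proved, stated in full; the proofs are below) =====
def Claim_equal_bitInterleave : Prop := ∀ (a : Int) (b : Int), Dom_bitInterleave a b → Pre_bitInterleave a b → Spec_bitInterleave a b (bitInterleave a b)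

-- ===== LEMMAS AND PROOFS =====

-- S x : x's bits spread to the even positions (mathematical characterisation of spread)
def pvS (x : Nat) : Nat :=
  if x = 0 then 0 else x % 2 + 4 * pvS (x / 2)
decreasing_by exact Nat.div_lt_self (Nat.pos_of_ne_zero (by assumption)) (by norm_num)

-- M a b : the Morton interleaving of a and b (mathematical characterisation of A's loop)
def pvM (a b : Nat) : Nat :=
  if a = 0 ∧ b = 0 then 0 else a % 2 + 2 * (b % 2) + 4 * pvM (a / 2) (b / 2)
termination_by a + b
decreasing_by
  rename_i h
  rcases Nat.eq_zero_or_pos a with ha | ha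
  · rcases Nat.eq_zero_or_pos b with hb | hb
    · exact absurd ⟨ha, hb⟩ h
    · have : b / 2 < b := Nat.div_lt_self hb (by norm_num)
      omega
  · have : a / 2 < a := Nat.div_lt_self ha (by norm_num)
    have : b / 2 ≤ b := Nat.div_le_self b 2
    omega

theorem pvS_unfold (x : Nat) : pvS x = x % 2 + 4 * pvS (x / 2) := by
  by_cases h : x = 0
  · subst h; simp [pvS]
  · conv_lhs => rw [pvS]
    rw [if_neg h]

theorem pvM_unfold (a b : Nat) : pvM a b = a % 2 + 2 * (b % 2) + 4 * pvM (a / 2) (b / 2) := by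
  by_cases h : a = 0 ∧ b = 0
  · obtain ⟨ha, hb⟩ := h; subst ha; subst hb; simp [pvM]
  · conv_lhs => rw [pvM]
    rw [if_neg h]

theorem pv_lor_shift_add (r x s : Nat) (h : r < 2 ^ s) :
    r ||| (x <<< s) = r + x * 2 ^ s := by
  have : r + x * 2 ^ s = 2 ^ s * x + r := by ring
  rw [this]
  apply Nat.eq_of_testBit_eq
  intro j
  rw [Nat.testBit_lor, Nat.testBit_shiftLeft, Nat.testBit_two_pow_mul_add x h j]
  by_cases hj : j < s
  · simp [hj, Nat.not_le.mpr hj]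
  · have hs : s ≤ j := Nat.not_lt.mp hj
    have hr : r.testBit j = false :=
      Nat.testBit_lt_two_pow (lt_of_lt_of_le h (Nat.pow_le_pow_right (by norm_num) hs))
    simp [hj, hs, hr]

-- cast bridges: the Int bit operations on nonnegative operands are the Nat ones
theorem pv_cast_land_one (m : Nat) : Int.land (m : Int) 1 = ((m % 2 : Nat) : Int) := by
  have h1 : Int.land (m : Int) 1 = ((m &&& 1 : Nat) : Int) := rfl
  rw [h1, Nat.and_one_is_mod]

theorem pv_cast_shiftRight (m : Nat) : ((m : Int) >>> (1 : Nat)) = ((m / 2 : Nat) : Int) := by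
  have h1 : ((m : Int) >>> (1 : Nat)) = ((m >>> 1 : Nat) : Int) := rfl
  rw [h1, Nat.shiftRight_one]

theorem pv_cast_shiftLeft (m s : Nat) : ((m : Int) <<< s) = ((m * 2 ^ s : Nat) : Int) := by
  have h1 : ((m : Int) <<< s) = ((m <<< s : Nat) : Int) := rfl
  rw [h1, Nat.shiftLeft_eq]

theorem pv_cast_lor (m n : Nat) : Int.lor (m : Int) (n : Int) = ((m ||| n : Nat) : Int) := rfl

theorem pv_spread_inv : ∀ (fuel x i r : Nat), x < 2 ^ fuel →
    spreadLoop fuel (x : Int) i (r : Int) = ((r + pvS x * 4 ^ i : Nat) : Int) := by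
  intro fuel
  induction fuel with
  | zero =>
    intro x i r hx
    have : x = 0 := by simpa using hx
    subst this
    simp [spreadLoop, pvS]
  | succ fuel ih =>
    intro x i r hx
    by_cases h0 : x = 0
    · subst h0; simp [spreadLoop]; rw [pvS]; simp
    · have hcond : (x : Int) ≠ 0 := by exact_mod_cast h0
      rw [spreadLoop]
      simp only [hcond, if_pos, ne_eq, not_false_eq_true]
      rw [pv_cast_land_one, pv_cast_shiftLeft, pv_cast_shiftRight]
      have hr : ((r : Int) + ((x % 2 * 2 ^ (2 * i) : Nat) : Int)) = ((r + x % 2 * 2 ^ (2 * i) : Nat) : Int) := by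
        push_cast; ring
      rw [hr]
      have hx2 : x / 2 < 2 ^ fuel := by
        rw [pow_succ] at hx; omega
      rw [ih (x / 2) (i + 1) _ hx2]
      congr 1
      rw [pvS_unfold x]
      have h4 : (2 : Nat) ^ (2 * i) = 4 ^ i := by
        rw [pow_mul]; norm_num
      rw [h4, pow_succ]
      ring

theorem pv_loopA_inv : ∀ (fuel a b r s : Nat), a < 2 ^ fuel → b < 2 ^ fuel → r < 2 ^ s →
    bitInterleaveLoop fuel (a : Int) (b : Int) (r : Int) s = ((r + pvM a b * 2 ^ s : Nat) : Int) := by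
  intro fuel
  induction fuel with
  | zero =>
    intro a b r s ha hb hr
    have ha0 : a = 0 := by simpa using ha
    have hb0 : b = 0 := by simpa using hb
    subst ha0; subst hb0
    rw [pvM]
    simp [bitInterleaveLoop]
  | succ fuel ih =>
    intro a b r s ha hb hr
    by_cases h0 : a = 0 ∧ b = 0
    · obtain ⟨ha0, hb0⟩ := h0
      subst ha0; subst hb0
      rw [pvM]
      simp [bitInterleaveLoop]
    · have hcond : (a : Int) ≠ 0 ∨ (b : Int) ≠ 0 := by
        rcases Decidable.not_and_iff_or_not.mp h0 with h | h
        · left; exact_mod_cast h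
        · right; exact_mod_cast h
      rw [bitInterleaveLoop]
      simp only [hcond, if_pos, ne_eq]
      rw [pv_cast_land_one a, pv_cast_land_one b, pv_cast_shiftLeft, pv_cast_shiftLeft,
        pv_cast_shiftRight, pv_cast_shiftRight, pv_cast_lor, pv_cast_lor]
      -- collapse the two ORs into additions
      have hstep1 : r ||| (a % 2 * 2 ^ s) = r + a % 2 * 2 ^ s := by
        have := pv_lor_shift_add r (a % 2) s hr
        rwa [Nat.shiftLeft_eq] at this
      rw [hstep1]
      have hr1 : r + a % 2 * 2 ^ s < 2 ^ (s + 1) := by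
        have : a % 2 ≤ 1 := by omega
        have h2 : a % 2 * 2 ^ s ≤ 2 ^ s := by
          calc a % 2 * 2 ^ s ≤ 1 * 2 ^ s := Nat.mul_le_mul_right _ this
          _ = 2 ^ s := by ring
        rw [pow_succ]; omega
      have hstep2 : (r + a % 2 * 2 ^ s) ||| (b % 2 * 2 ^ (s + 1)) =
          r + a % 2 * 2 ^ s + b % 2 * 2 ^ (s + 1) := by
        have := pv_lor_shift_add (r + a % 2 * 2 ^ s) (b % 2) (s + 1) hr1
        rwa [Nat.shiftLeft_eq] at this
      rw [hstep2]
      have hr2 : r + a % 2 * 2 ^ s + b % 2 * 2 ^ (s + 1) < 2 ^ (s + 2) := by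
        have : b % 2 ≤ 1 := by omega
        have h2 : b % 2 * 2 ^ (s + 1) ≤ 2 ^ (s + 1) := by
          calc b % 2 * 2 ^ (s + 1) ≤ 1 * 2 ^ (s + 1) := Nat.mul_le_mul_right _ this
          _ = 2 ^ (s + 1) := by ring
        have h3 : (2 : Nat) ^ (s + 2) = 2 ^ (s + 1) + 2 ^ (s + 1) := by rw [pow_succ]; ring
        omega
      have ha2 : a / 2 < 2 ^ fuel := by rw [pow_succ] at ha; omega
      have hb2 : b / 2 < 2 ^ fuel := by rw [pow_succ] at hb; omega
      rw [ih (a / 2) (b / 2) _ (s + 2) ha2 hb2 hr2]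
      congr 1
      conv_rhs => rw [pvM_unfold a b]
      have e1 : (2 : Nat) ^ (s + 1) = 2 ^ s * 2 := by ring
      have e2 : (2 : Nat) ^ (s + 2) = 2 ^ s * 4 := by ring
      rw [e1, e2]
      ring

theorem pv_M_eq_S (a b : Nat) : pvM a b = pvS a + 2 * pvS b := by
  induction a, b using pvM.induct with
  | case1 a b h =>
    obtain ⟨ha, hb⟩ := h
    subst ha; subst hb
    rw [pvM]
    simp [pvS]
  | case2 a b h ih =>
    rw [pvM_unfold a b, ih, pvS_unfold a, pvS_unfold b]
    ring

-- ===== VERDICT (by name: the statement is the Claim_ definition above) =====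
theorem bitInterleave_spec : Claim_equal_bitInterleave := by
  intro a b hdom hpre
  obtain ⟨ha, hb⟩ := hpre
  unfold Spec_bitInterleave
  have hdom' : a ≤ 2147483648 ∧ b ≤ 2147483648 := by
    unfold Dom_bitInterleave pvDomInt at hdom
    simp only [Bool.and_eq_true, decide_eq_true_eq] at hdom
    exact ⟨hdom.1.2, hdom.2.2⟩
  set na := a.toNat with hna
  set nb := b.toNat with hnb
  have hea : a = (na : Int) := (Int.toNat_of_nonneg ha).symm
  have heb : b = (nb : Int) := (Int.toNat_of_nonneg hb).symm
  have hna64 : na < 2 ^ 64 := by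
    have : na ≤ 2147483648 := by omega
    calc na ≤ 2147483648 := this
    _ < 2 ^ 64 := by norm_num
  have hnb64 : nb < 2 ^ 64 := by
    have : nb ≤ 2147483648 := by omega
    calc nb ≤ 2147483648 := this
    _ < 2 ^ 64 := by norm_num
  rw [hea, heb]
  unfold bitInterleave bitInterleave_alt
  have h0 : ((0 : Nat) : Int) = (0 : Int) := rfl
  rw [← h0]
  rw [pv_loopA_inv 64 na nb 0 0 hna64 hnb64 (by norm_num)]
  rw [pv_spread_inv 64 na 0 0 hna64, pv_spread_inv 64 nb 0 0 hnb64]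
  rw [pv_cast_shiftLeft]
  rw [pv_M_eq_S]
  push_cast
  ring
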